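-- pv_equiv track=rewrite | github.com/swati-goyal/Python-Programs | foundations-path/alternative-split-worked.py | make_encryption_dict
-- ===== SOURCE A (Python) =====
-- def make_encryption_dict(text):
--     encryption_dict = dict()
--     y = 1
--     c = text
--     while c not in encryption_dict.values():
--         desired = ''
--         remaining = ''
--         i = 0
--         while i < len(text):
--             if i % 2 == 0:
--                 remaining += text[i]
--             else:
--                 desired += text[i]
--             i += 1
--         text = desired + remaining
--         encryption_dict[y] = text
--         y += 1
--     return encryption_dict
-- ===== SOURCE B (Python) =====
-- def make_encryption_dict(text):
--     n = len(text)
--     perm = list(range(1, n, 2)) + list(range(0, n, 2))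
--     result = {}
--     current = text
--     key = 1
--     while True:
--         current = ''.join(current[p] for p in perm)
--         result[key] = current
--         if current == text:
--             return result
--         key += 1
-- ===== Notes on version B (the rewrite author's own statement) =====
-- stated objective: alternative
-- what changed: B precomputes the even/odd split as one index permutation before the loop and applies it each step with a single join-gather, instead of A's per-step inner while loop that rebuilds two strings by parity-branched character concatenation; B's loop stores then compares the new string to the original, where A re-scans the dict's values each iteration.
import Mathlib
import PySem

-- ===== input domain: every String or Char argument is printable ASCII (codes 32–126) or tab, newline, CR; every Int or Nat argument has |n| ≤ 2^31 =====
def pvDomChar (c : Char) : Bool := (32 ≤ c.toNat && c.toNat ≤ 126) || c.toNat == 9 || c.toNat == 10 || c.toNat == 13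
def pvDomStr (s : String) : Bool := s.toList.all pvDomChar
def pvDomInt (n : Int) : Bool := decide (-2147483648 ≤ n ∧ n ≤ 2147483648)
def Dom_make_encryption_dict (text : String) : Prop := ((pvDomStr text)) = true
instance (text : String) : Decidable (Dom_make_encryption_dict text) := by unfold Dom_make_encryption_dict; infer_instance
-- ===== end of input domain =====

-- B replaces A's per-step parity-branch two-accumulator rebuild with one precomputed
-- index permutation gathered over each step (objective: alternative decomposition, same cost).

-- ===== PORT A =====
-- inner 'while i < len(text)' loop of A: even indices go to `remaining`, odd to `desired`
def pvSplitLoop (tl : List Char) (i : Nat) (desired remaining : List Char) : List Char × List Char :=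
  if h : i < tl.length then
    if i % 2 == 0 then pvSplitLoop tl (i + 1) desired (remaining ++ [tl[i]])
    else pvSplitLoop tl (i + 1) (desired ++ [tl[i]]) remaining
  else (desired, remaining)
  termination_by tl.length - i
  decreasing_by all_goals omega

-- one iteration of A's outer loop body: text = desired + remaining
def pvStepA (t : String) : String :=
  let p := pvSplitLoop t.toList 0 [] []
  String.ofList (p.1 ++ p.2)

-- A's 'while c not in encryption_dict.values()' loop; the fuel argument only makes the
-- recursion total (the loop stops when the original string reappears, within n!+1 entries)
def pvLoopA (fuel : Nat) (c : String) (text : String) (d : PySem.Dict Int String) (y : Int) :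
    PySem.Dict Int String :=
  match fuel with
  | 0 => d
  | fuel + 1 =>
    if d.values.contains c then d
    else
      let t := pvStepA text
      pvLoopA fuel c t (d.insert y t) (y + 1)

def make_encryption_dict (text : String) : List (Int × String) :=
  (pvLoopA (text.toList.length.factorial + 1) text text PySem.Dict.empty 1).items

-- ===== PORT B =====
-- perm = list(range(1, n, 2)) + list(range(0, n, 2))
def pvPerm (n : Int) : List Int :=
  PySem.List.pyRange 1 n 2 ++ PySem.List.pyRange 0 n 2

-- ''.join(current[p] for p in perm); every p is an in-range index, so pyGetD is exact
def pvGather (perm : List Int) (cur : String) : String :=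
  String.ofList (perm.map (fun p => PySem.List.pyGetD cur.toList p ' '))

-- B's 'while True: … if current == text: return result' loop; fuel is the same totality guard
def pvLoopB (fuel : Nat) (perm : List Int) (orig : String) (cur : String)
    (d : PySem.Dict Int String) (key : Int) : PySem.Dict Int String :=
  match fuel with
  | 0 => d
  | fuel + 1 =>
    let next := pvGather perm cur
    let d' := d.insert key next
    if next == orig then d' else pvLoopB fuel perm orig next d' (key + 1)

def make_encryption_dict_alt (text : String) : List (Int × String) :=
  (pvLoopB (text.toList.length.factorial + 1) (pvPerm (text.toList.length : Int))
    text text PySem.Dict.empty 1).items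

-- ===== PRECONDITION & SPEC =====
def Spec_make_encryption_dict (text : String) (out : List (Int × String)) : Prop := out = make_encryption_dict_alt text
instance (text : String) (out : List (Int × String)) : Decidable (Spec_make_encryption_dict text out) := by unfold Spec_make_encryption_dict; infer_instance

-- ===== CLAIM (what is proved, stated in full; the proofs are below) =====
def Claim_equal_make_encryption_dict : Prop := ∀ (text : String), Dom_make_encryption_dict text → Spec_make_encryption_dict text (make_encryption_dict text)

-- ===== LEMMAS AND PROOFS =====

-- characters of tl at indices i, i+2, i+4, …
def pvTake2 (tl : List Char) (i : Nat) : List Char :=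
  if h : i < tl.length then tl[i] :: pvTake2 tl (i + 2) else []
  termination_by tl.length - i
  decreasing_by omega

lemma pvTake2_cons (tl : List Char) (i : Nat) (h : i < tl.length) :
    pvTake2 tl i = tl[i] :: pvTake2 tl (i + 2) := by
  rw [pvTake2]; simp [h]

lemma pvTake2_nil (tl : List Char) (i : Nat) (h : ¬ i < tl.length) :
    pvTake2 tl i = [] := by
  rw [pvTake2]; simp [h]

lemma pvPyRange_two_nil (a b : Int) (h : b ≤ a) : PySem.List.pyRange a b 2 = [] := by
  rw [PySem.List.pyRange_of_pos a b (by norm_num)]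
  simp [show ¬ a < b by omega]

lemma pvPyRange_two_cons (a b : Int) (h : a < b) :
    PySem.List.pyRange a b 2 = a :: PySem.List.pyRange (a + 2) b 2 := by
  rw [PySem.List.pyRange_of_pos a b (by norm_num),
      PySem.List.pyRange_of_pos (a + 2) b (by norm_num)]
  by_cases h2 : a + 2 < b
  · have hcnt : ((b - a + 2 - 1) / 2).toNat = ((b - (a + 2) + 2 - 1) / 2).toNat + 1 := by omega
    simp only [if_pos h, if_pos h2, hcnt, List.range_succ_eq_map, List.map_cons, List.map_map]
    congr 1
    · push_cast; ring
    · apply List.map_congr_left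
      intro k _
      simp only [Function.comp_apply]
      push_cast
      ring
  · have hcnt : ((b - a + 2 - 1) / 2).toNat = 1 := by omega
    simp [if_pos h, if_neg h2, hcnt, List.range_succ]

lemma pvMapPyRange_eq_take2 (tl : List Char) (i : Nat) :
    (PySem.List.pyRange (i : Int) (tl.length : Int) 2).map
      (fun p => PySem.List.pyGetD tl p ' ') = pvTake2 tl i := by
  by_cases h : i < tl.length
  · rw [pvPyRange_two_cons _ _ (by exact_mod_cast h)]
    rw [pvTake2_cons tl i h]
    simp only [List.map_cons]
    congr 1
    · rw [PySem.List.pyGetD_eq_getElem tl ' ' (Int.natCast_nonneg i) (by exact_mod_cast h)]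
      simp
    · have hcast : ((i : Int) + 2) = ((i + 2 : Nat) : Int) := by push_cast; ring
      rw [hcast, pvMapPyRange_eq_take2 tl (i + 2)]
  · rw [pvPyRange_two_nil _ _ (by exact_mod_cast Nat.le_of_not_lt h)]
    rw [pvTake2_nil tl i h]
    simp
  termination_by tl.length - i
  decreasing_by omega

lemma pvSplitLoop_eq (tl : List Char) (i : Nat) (d r : List Char) :
    (i % 2 = 0 → pvSplitLoop tl i d r = (d ++ pvTake2 tl (i + 1), r ++ pvTake2 tl i)) ∧
    (i % 2 = 1 → pvSplitLoop tl i d r = (d ++ pvTake2 tl i, r ++ pvTake2 tl (i + 1))) := by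
  by_cases h : i < tl.length
  · constructor
    · intro hpar
      rw [pvSplitLoop]
      simp only [dif_pos h, hpar, beq_self_eq_true, if_true]
      rw [(pvSplitLoop_eq tl (i + 1) d (r ++ [tl[i]])).2 (by omega)]
      rw [pvTake2_cons tl i h]
      simp [List.append_assoc]
    · intro hpar
      rw [pvSplitLoop]
      have hne : (i % 2 == 0) = false := by simp [hpar]
      simp only [dif_pos h, hne, Bool.false_eq_true, if_false]
      rw [(pvSplitLoop_eq tl (i + 1) (d ++ [tl[i]]) r).1 (by omega)]
      rw [pvTake2_cons tl i h]
      simp [List.append_assoc]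
  · have hni : ¬ i + 1 < tl.length := by omega
    rw [pvSplitLoop]
    rw [pvTake2_nil tl i h, pvTake2_nil tl (i + 1) hni]
    simp [h]
  termination_by tl.length - i
  decreasing_by all_goals omega

-- the two step functions agree on every string (B's perm is built from the string's length)
lemma pvStep_eq (s : String) :
    pvStepA s = pvGather (pvPerm (s.toList.length : Int)) s := by
  unfold pvStepA pvGather pvPerm
  rw [(pvSplitLoop_eq s.toList 0 [] []).1 rfl]
  simp only [List.map_append, List.nil_append]
  rw [show ((1 : Int)) = ((1 : Nat) : Int) by norm_num, pvMapPyRange_eq_take2,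
      show ((0 : Int)) = ((0 : Nat) : Int) by norm_num, pvMapPyRange_eq_take2]

lemma pvTake2_length (tl : List Char) (i : Nat) :
    (pvTake2 tl i).length = (tl.length - i + 1) / 2 := by
  rw [pvTake2]
  by_cases h : i < tl.length
  · simp only [dif_pos h, List.length_cons, pvTake2_length tl (i + 2)]
    omega
  · simp only [dif_neg h, List.length_nil]
    omega
  termination_by tl.length - i
  decreasing_by omega

-- A's step preserves the string length
lemma pvStepA_length (s : String) : (pvStepA s).toList.length = s.toList.length := by
  unfold pvStepA
  rw [(pvSplitLoop_eq s.toList 0 [] []).1 rfl]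
  simp only [String.toList_ofList, List.nil_append, List.length_append, pvTake2_length]
  omega

lemma pvMemValues_insert_self (d : PySem.Dict Int String) (k : Int) (v : String) :
    v ∈ (d.insert k v).values := by
  have := PySem.Dict.mem_items_insert_self d k v
  simp only [PySem.Dict.values]
  exact List.mem_map_of_mem this

-- the two loops agree whenever the original string is not yet among the stored values
lemma pvLoop_eq (fuel : Nat) (c cur : String) (d : PySem.Dict Int String) (y : Int)
    (hlen : cur.toList.length = c.toList.length)
    (hc : c ∉ d.values) :
    pvLoopA fuel c cur d y = pvLoopB fuel (pvPerm (c.toList.length : Int)) c cur d y := by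
  induction fuel generalizing cur d y with
  | zero => rfl
  | succ fuel ih =>
    rw [pvLoopA, pvLoopB]
    have hcon : d.values.contains c = false := by
      simp only [List.contains_eq_mem, decide_eq_false_iff_not]
      exact hc
    simp only [hcon, Bool.false_eq_true, if_false]
    have hstep : pvGather (pvPerm (c.toList.length : Int)) cur = pvStepA cur := by
      rw [← hlen, ← pvStep_eq]
    rw [hstep]
    by_cases heq : pvStepA cur = c
    · simp only [heq, beq_self_eq_true, if_true]
      cases fuel with
      | zero => rfl
      | succ fuel' =>
        rw [pvLoopA]
        have hcc : (d.insert y c).values.contains c = true := by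
          simp only [List.contains_eq_mem, decide_eq_true_eq]
          exact pvMemValues_insert_self d y c
        simp only [hcc, if_true]
    · have hne : (pvStepA cur == c) = false := by simp [heq]
      simp only [hne, Bool.false_eq_true, if_false]
      apply ih
      · rw [pvStepA_length]; exact hlen
      · intro hmem
        rcases PySem.Dict.mem_values_insert d y (pvStepA cur) c hmem with h1 | h1
        · exact heq h1.symm
        · exact hc h1

-- ===== VERDICT (by name: the statement is the Claim_ definition above) =====
theorem make_encryption_dict_spec : Claim_equal_make_encryption_dict := by
  intro text _
  unfold Spec_make_encryption_dict make_encryption_dict make_encryption_dict_alt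
  rw [pvLoop_eq _ text text PySem.Dict.empty 1 rfl (by simp [PySem.Dict.empty, PySem.Dict.values])]
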